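-- pv_equiv track=rewrite | github.com/PlayfulProcess/recursive.eco-schemas | scripts/build_leaves_of_grass.py | clean_poem_text
-- ===== SOURCE A (Python) =====
-- def clean_poem_text(text):
--     """Clean up poem text - remove excessive blank lines, normalize indentation."""
--     lines = text.split('\n')
--     # Remove leading/trailing blank lines
--     while lines and not lines[0].strip():
--         lines.pop(0)
--     while lines and not lines[-1].strip():
--         lines.pop()
--
--     # Collapse runs of 3+ blank lines to 2
--     cleaned = []
--     blank_count = 0
--     for line in lines:
--         if not line.strip():
--             blank_count += 1
--             if blank_count <= 2:
--                 cleaned.append(line)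
--         else:
--             blank_count = 0
--             cleaned.append(line)
--
--     return '\n'.join(cleaned)
-- ===== SOURCE B (Python) =====
-- def clean_poem_text(text):
--     """Clean up poem text - remove excessive blank lines, normalize indentation."""
--     lines = text.split('\n')
--     # Group consecutive lines into maximal runs of blank / non-blank lines.
--     runs = []
--     i, n = 0, len(lines)
--     while i < n:
--         blank = not lines[i].strip()
--         j = i + 1
--         while j < n and (not lines[j].strip()) == blank:
--             j += 1
--         runs.append((blank, lines[i:j]))
--         i = j
--     # Drop a leading and a trailing blank run.
--     if runs and runs[0][0]:
--         runs.pop(0)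
--     if runs and runs[-1][0]:
--         runs.pop()
--     # Blank runs contribute at most their first two lines.
--     out = []
--     for blank, run in runs:
--         out.extend(run[:2] if blank else run)
--     return '\n'.join(out)
-- ===== Notes on version B (the rewrite author's own statement) =====
-- stated objective: alternative
-- what changed: Instead of two destructive pop-loops for the edges plus a stateful blank_count pass, B groups the lines once into maximal blank/non-blank runs, drops a leading and a trailing blank run, and keeps at most the first two lines of each blank run.
import Mathlib
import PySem

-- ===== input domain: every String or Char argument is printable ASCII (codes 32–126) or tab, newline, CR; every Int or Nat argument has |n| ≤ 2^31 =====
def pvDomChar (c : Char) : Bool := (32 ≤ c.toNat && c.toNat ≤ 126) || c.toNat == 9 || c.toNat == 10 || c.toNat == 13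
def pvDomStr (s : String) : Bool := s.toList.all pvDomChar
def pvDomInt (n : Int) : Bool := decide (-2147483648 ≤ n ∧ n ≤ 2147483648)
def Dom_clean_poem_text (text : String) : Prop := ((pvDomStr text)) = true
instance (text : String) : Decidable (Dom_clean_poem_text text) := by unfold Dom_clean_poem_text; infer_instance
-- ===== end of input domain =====

-- B replaces A's two destructive pop-loops plus the stateful blank_count pass by one grouping
-- into maximal blank/non-blank runs, dropping edge blank runs and truncating blank runs to 2.

-- 'not line.strip()' — a line is blank iff its strip is empty
def pvBlank (l : String) : Bool := PySem.Str.strip l == ""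

-- ===== PORT A =====
-- 'while lines and not lines[0].strip(): lines.pop(0)'
def cptA_dropLead : List String → List String
  | [] => []
  | l :: rest => if pvBlank l then cptA_dropLead rest else l :: rest

-- 'while lines and not lines[-1].strip(): lines.pop()' — popping from the end is
-- dropping leading blanks of the reversed list (exact)
def cptA_dropTrail (ls : List String) : List String := (cptA_dropLead ls.reverse).reverse

-- the for-loop with its blank_count accumulator
def cptA_loop : List String → Nat → List String
  | [], _ => []
  | l :: rest, bc =>
    if pvBlank l then
      if bc + 1 ≤ 2 then l :: cptA_loop rest (bc + 1) else cptA_loop rest (bc + 1)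
    else l :: cptA_loop rest 0

def clean_poem_text (text : String) : String :=
  PySem.Str.join "\n" (cptA_loop (cptA_dropTrail (cptA_dropLead ((PySem.Str.split? text "\n").getD []))) 0)

-- ===== PORT B =====
-- the grouping while-loop: maximal runs of equal blankness (lines[i:j] = head :: takeWhile)
def cptB_runs : List String → List (Bool × List String)
  | [] => []
  | l :: rest =>
    (pvBlank l, l :: rest.takeWhile (fun x => pvBlank x == pvBlank l)) ::
      cptB_runs (rest.dropWhile (fun x => pvBlank x == pvBlank l))
termination_by ls => ls.length
decreasing_by simp; exact List.length_dropWhile_le _ _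

-- 'if runs and runs[0][0]: runs.pop(0)'
def cptB_dropHead : List (Bool × List String) → List (Bool × List String)
  | (true, _) :: t => t
  | rs => rs

-- 'if runs and runs[-1][0]: runs.pop()'
def cptB_dropLast (rs : List (Bool × List String)) : List (Bool × List String) :=
  match rs.getLast? with
  | some (true, _) => rs.dropLast
  | _ => rs

def clean_poem_text_alt (text : String) : String :=
  PySem.Str.join "\n"
    ((cptB_dropLast (cptB_dropHead (cptB_runs ((PySem.Str.split? text "\n").getD [])))).foldl
      (fun acc pr => acc ++ (if pr.1 then pr.2.take 2 else pr.2)) [])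

-- ===== PRECONDITION & SPEC =====
def Spec_clean_poem_text (text : String) (out : String) : Prop := out = clean_poem_text_alt text
instance (text : String) (out : String) : Decidable (Spec_clean_poem_text text out) := by unfold Spec_clean_poem_text; infer_instance

-- ===== CLAIM (what is proved, stated in full; the proofs are below) =====
def Claim_equal_clean_poem_text : Prop := ∀ (text : String), Dom_clean_poem_text text → Spec_clean_poem_text text (clean_poem_text text)

-- ===== LEMMAS AND PROOFS =====

def cptStep (pr : Bool × List String) : List String := if pr.1 then pr.2.take 2 else pr.2

theorem cptStep_flatMap_eq (rs : List (Bool × List String)) :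
    rs.flatMap (fun pr => if pr.1 then pr.2.take 2 else pr.2) = rs.flatMap cptStep := rfl

theorem cptA_dropLead_eq_dropWhile (ls : List String) :
    cptA_dropLead ls = ls.dropWhile pvBlank := by
  induction ls with
  | nil => rfl
  | cons l rest ih => simp [cptA_dropLead, List.dropWhile]; split_ifs <;> simp_all

-- generic takeWhile/dropWhile facts
theorem pv_takeWhile_all {α : Type} (p : α → Bool) (t zs : List α) (h : ∀ x ∈ t, p x = true) :
    List.takeWhile p (t ++ zs) = t ++ List.takeWhile p zs := by
  induction t with
  | nil => simp
  | cons a t ih =>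
    simp only [List.cons_append, List.takeWhile_cons, h a (by simp)]
    simp [ih fun x hx => h x (by simp [hx])]

theorem pv_dropWhile_all {α : Type} (p : α → Bool) (t zs : List α) (h : ∀ x ∈ t, p x = true) :
    List.dropWhile p (t ++ zs) = List.dropWhile p zs := by
  induction t with
  | nil => simp
  | cons a t ih =>
    simp only [List.cons_append, List.dropWhile_cons, h a (by simp)]
    simp [ih fun x hx => h x (by simp [hx])]

theorem pv_dropWhile_none {α : Type} (p : α → Bool) (l : List α) (h : ∀ x ∈ l, p x = false) :
    List.dropWhile p l = l := by
  cases l with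
  | nil => rfl
  | cons a t => simp [h a (by simp)]

theorem pv_dropWhile_head {α : Type} (p : α → Bool) (l : List α) (a : α) (t : List α)
    (h : List.dropWhile p l = a :: t) : p a = false := by
  induction l with
  | nil => simp at h
  | cons x xs ih =>
    rw [List.dropWhile_cons] at h
    by_cases hx : p x = true
    · exact ih (by simpa [hx] using h)
    · simp [hx] at h; simp [← h.1]; simpa using hx

-- unfolding cptB_runs over an explicit run
theorem cptB_runs_cons (l : String) (t zs : List String)
    (ht : ∀ x ∈ t, pvBlank x = pvBlank l)
    (hz : zs = [] ∨ ∃ a t', zs = a :: t' ∧ pvBlank a ≠ pvBlank l) :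
    cptB_runs (l :: (t ++ zs)) = (pvBlank l, l :: t) :: cptB_runs zs := by
  have htb : ∀ x ∈ t, (pvBlank x == pvBlank l) = true := fun x hx => by simp [ht x hx]
  rw [cptB_runs]
  rw [pv_takeWhile_all _ t zs htb, pv_dropWhile_all _ t zs htb]
  rcases hz with h0 | ⟨a, t', ha, hk⟩
  · simp [h0]
  · have : (pvBlank a == pvBlank l) = false := by simpa using hk
    simp [ha, this]

theorem cptB_runs_nil : cptB_runs [] = [] := by rw [cptB_runs]

theorem cptB_runs_ne_nil (l : String) (rest : List String) : cptB_runs (l :: rest) ≠ [] := by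
  rw [cptB_runs]; simp

-- Lemma 1: dropping the leading blank run = A's leading trim
theorem cptB_runs_dropLead (ls : List String) :
    cptB_dropHead (cptB_runs ls) = cptB_runs (cptA_dropLead ls) := by
  cases ls with
  | nil => simp [cptB_runs_nil, cptB_dropHead, cptA_dropLead]
  | cons l rest =>
    cases hb : pvBlank l with
    | true =>
      have h1 : cptA_dropLead (l :: rest) = cptA_dropLead rest := by simp [cptA_dropLead, hb]
      rw [h1, cptA_dropLead_eq_dropWhile, cptB_runs]
      simp only [hb, cptB_dropHead]
      congr 1
      simp
    | false =>
      have h1 : cptA_dropLead (l :: rest) = l :: rest := by simp [cptA_dropLead, hb]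
      rw [h1, cptB_runs]
      simp [cptB_dropHead, hb]

-- A's trailing trim as dropWhile on the reverse
theorem cptA_dropTrail_eq (ls : List String) :
    cptA_dropTrail ls = (ls.reverse.dropWhile pvBlank).reverse := by
  simp [cptA_dropTrail, cptA_dropLead_eq_dropWhile]

theorem cptA_dropTrail_prefix (ls : List String) : cptA_dropTrail ls <+: ls := by
  rw [cptA_dropTrail_eq]
  conv_rhs => rw [← List.reverse_reverse ls]
  exact List.reverse_prefix.mpr (List.dropWhile_suffix _)

theorem cptB_dropLast_cons (pr : Bool × List String) (rs : List (Bool × List String))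
    (h : rs ≠ []) : cptB_dropLast (pr :: rs) = pr :: cptB_dropLast rs := by
  obtain ⟨a, ha⟩ : ∃ a, rs.getLast? = some a := by
    cases hl : rs.getLast? with
    | none => exact absurd (List.getLast?_eq_none_iff.mp hl) h
    | some a => exact ⟨a, rfl⟩
  have ha' : (pr :: rs).getLast? = some a := by rw [List.getLast?_cons, ha]; rfl
  unfold cptB_dropLast
  rw [ha, ha']
  obtain ⟨b, run⟩ := a
  cases b
  · rfl
  · simp [List.dropLast_cons_of_ne_nil h]

-- Lemma 2: dropping the trailing blank run = A's trailing trim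
theorem cptB_runs_dropTrail (ls : List String) :
    cptB_dropLast (cptB_runs ls) = cptB_runs (cptA_dropTrail ls) := by
  induction ls using cptB_runs.induct with
  | case1 => simp [cptB_runs_nil, cptB_dropLast, cptA_dropTrail, cptA_dropLead]
  | case2 l rest ih =>
    have hsplit := List.takeWhile_append_dropWhile
      (p := fun x => pvBlank x == pvBlank l) (l := rest)
    set t := rest.takeWhile (fun x => pvBlank x == pvBlank l) with hT
    set rest' := rest.dropWhile (fun x => pvBlank x == pvBlank l) with hR
    have hall_t : ∀ x ∈ t, pvBlank x = pvBlank l := fun x hx => by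
      simpa using List.mem_takeWhile_imp hx
    by_cases hre : rest' = []
    · -- a single run
      have hrest : rest = t := by rw [← hsplit, hre, List.append_nil]
      have hrun : cptB_runs (l :: rest) = [(pvBlank l, l :: t)] := by
        conv_lhs => rw [show l :: rest = l :: (t ++ []) by simp [hrest]]
        rw [cptB_runs_cons l t [] hall_t (Or.inl rfl), cptB_runs_nil]
      cases hb : pvBlank l with
      | false =>
        have hnb : ∀ x ∈ l :: rest, pvBlank x = false := by
          intro x hx
          rcases List.mem_cons.mp hx with h | h
          · simpa [h] using hb
          · rw [hall_t x (hrest ▸ h), hb]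
        have hdt : cptA_dropTrail (l :: rest) = l :: rest := by
          rw [cptA_dropTrail_eq, pv_dropWhile_none _ _ (fun x hx => hnb x (List.mem_reverse.mp hx)),
            List.reverse_reverse]
        rw [hdt, hrun]
        simp [cptB_dropLast, hb]
      | true =>
        have hba : ∀ x ∈ l :: rest, pvBlank x = true := by
          intro x hx
          rcases List.mem_cons.mp hx with h | h
          · simpa [h] using hb
          · rw [hall_t x (hrest ▸ h), hb]
        have hdt : cptA_dropTrail (l :: rest) = [] := by
          rw [cptA_dropTrail_eq, List.dropWhile_eq_nil_iff.mpr
            (fun x hx => hba x (List.mem_reverse.mp hx))]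
          rfl
        rw [hdt, hrun]
        simp [cptB_dropLast, hb]
        exact cptB_runs_nil
    · -- at least two runs
      obtain ⟨a, t', ha⟩ : ∃ a t', rest' = a :: t' := by
        cases h : rest' with
        | nil => exact absurd h hre
        | cons a t' => exact ⟨a, t', rfl⟩
      have hka : pvBlank a ≠ pvBlank l := by
        have := pv_dropWhile_head _ rest a t' (hR ▸ ha)
        simpa using this
      have hrunsne : cptB_runs rest' ≠ [] := by rw [ha]; exact cptB_runs_ne_nil _ _
      have hLHS : cptB_dropLast (cptB_runs (l :: rest)) =
          (pvBlank l, l :: t) :: cptB_runs (cptA_dropTrail rest') := by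
        conv_lhs => rw [show l :: rest = l :: (t ++ rest') by rw [hsplit],
          cptB_runs_cons l t rest' hall_t (Or.inr ⟨a, t', ha, hka⟩)]
        rw [cptB_dropLast_cons _ _ hrunsne, ih]
      rw [hLHS]
      by_cases hz : cptA_dropTrail rest' = []
      · -- the tail trims away entirely; then its run is blank and the first run is not
        have hzdw : rest'.reverse.dropWhile pvBlank = [] := by
          have := cptA_dropTrail_eq rest' ▸ hz
          simpa using this
        have hba : ∀ x ∈ rest', pvBlank x = true := by
          intro x hx
          exact List.dropWhile_eq_nil_iff.mp hzdw x (by simpa using hx)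
        have hk : pvBlank l = false := by
          have := hba a (ha ▸ List.mem_cons_self ..)
          cases hkl : pvBlank l
          · rfl
          · exact absurd (hkl ▸ this) hka
        have hnb : ∀ x ∈ l :: t, pvBlank x = false := by
          intro x hx
          rcases List.mem_cons.mp hx with h | h
          · simpa [h] using hk
          · rw [hall_t x h, hk]
        have hdt : cptA_dropTrail (l :: rest) = l :: t := by
          rw [cptA_dropTrail_eq, show l :: rest = (l :: t) ++ rest' by simp [hsplit],
            List.reverse_append, List.dropWhile_append, hzdw]
          simp only [List.isEmpty_nil, if_true]
          rw [pv_dropWhile_none _ _ (fun x hx => hnb x (List.mem_reverse.mp hx)),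
            List.reverse_reverse]
        rw [hdt, hz, show l :: t = l :: (t ++ []) by simp,
          cptB_runs_cons l t [] hall_t (Or.inl rfl)]
        simp
      · -- the tail keeps a nonempty trimmed remainder starting with rest''s head
        have hzdw : rest'.reverse.dropWhile pvBlank ≠ [] := by
          intro h
          exact hz (by rw [cptA_dropTrail_eq, h]; rfl)
        have hdt : cptA_dropTrail (l :: rest) = (l :: t) ++ cptA_dropTrail rest' := by
          rw [cptA_dropTrail_eq, show l :: rest = (l :: t) ++ rest' by simp [hsplit],
            List.reverse_append, List.dropWhile_append]
          rw [if_neg (by simpa using hzdw)]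
          rw [List.reverse_append, List.reverse_reverse, cptA_dropTrail_eq]
        have hhead : ∃ t'', cptA_dropTrail rest' = a :: t'' := by
          obtain ⟨rem, hrem⟩ := cptA_dropTrail_prefix rest'
          cases hdd : cptA_dropTrail rest' with
          | nil => exact absurd hdd hz
          | cons b t'' =>
            rw [hdd] at hrem
            have h2 : b = a ∧ t'' ++ rem = t' := by
              have := hrem.trans ha
              simpa using this
            exact ⟨t'', by rw [h2.1]⟩
        obtain ⟨t'', ht''⟩ := hhead
        rw [hdt, List.cons_append,
          cptB_runs_cons l t (cptA_dropTrail rest') hall_t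
            (Or.inr ⟨a, t'', ht'', hka⟩)]

-- the counting loop on a nonblank run
theorem cptA_loop_nonblank (t : List String) (h : ∀ x ∈ t, pvBlank x = false)
    (xs : List String) : cptA_loop (t ++ xs) 0 = t ++ cptA_loop xs 0 := by
  induction t with
  | nil => simp
  | cons a t ih =>
    simp only [List.cons_append, cptA_loop, h a (by simp)]
    simp [ih fun x hx => h x (by simp [hx])]

theorem cptA_loop_start (xs : List String) (c : Nat)
    (h : ∀ a ∈ xs.head?, pvBlank a = false) : cptA_loop xs c = cptA_loop xs 0 := by
  cases xs with
  | nil => rfl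
  | cons a t => simp [cptA_loop, h a rfl]

-- the counting loop on a blank run keeps its first 2 - c lines
theorem cptA_loop_blank (bs : List String) (hb : ∀ x ∈ bs, pvBlank x = true)
    (xs : List String) (hx : ∀ a ∈ xs.head?, pvBlank a = false) (c : Nat) :
    cptA_loop (bs ++ xs) c = bs.take (2 - c) ++ cptA_loop xs 0 := by
  induction bs generalizing c with
  | nil => simpa using cptA_loop_start xs c hx
  | cons b bs ih =>
    have hbb : pvBlank b = true := hb b (by simp)
    have ih' := ih (fun x hx' => hb x (by simp [hx'])) (c + 1)
    by_cases hc : c + 1 ≤ 2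
    · have h2 : 2 - c = (2 - (c + 1)) + 1 := by omega
      simp [cptA_loop, hbb, hc, ih', h2]
    · have h2 : 2 - c = 0 := by omega
      have h3 : 2 - (c + 1) = 0 := by omega
      simp [cptA_loop, hbb, hc, ih', h2, h3]

-- Lemma 3: A's counting loop = truncating each blank run to 2
theorem cptA_loop_eq_flatMap (ls : List String) :
    cptA_loop ls 0 = (cptB_runs ls).flatMap cptStep := by
  induction ls using cptB_runs.induct with
  | case1 => simp [cptB_runs_nil, cptA_loop]
  | case2 l rest ih =>
    have hsplit := List.takeWhile_append_dropWhile
      (p := fun x => pvBlank x == pvBlank l) (l := rest)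
    set t := rest.takeWhile (fun x => pvBlank x == pvBlank l) with hT
    set rest' := rest.dropWhile (fun x => pvBlank x == pvBlank l) with hR
    have hall_t : ∀ x ∈ t, pvBlank x = pvBlank l := fun x hx => by
      simpa using List.mem_takeWhile_imp hx
    have hhead : ∀ a ∈ rest'.head?, pvBlank a ≠ pvBlank l := by
      intro a haa
      cases h : rest' with
      | nil => rw [h] at haa; simp at haa
      | cons b t' =>
        rw [h] at haa
        have hb := pv_dropWhile_head _ rest b t' (hR ▸ h)
        have heq : a = b := by
          have := by simpa using haa
          exact this.symm ▸ rfl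
        subst heq
        simpa using hb
    have hz : rest' = [] ∨ ∃ a t', rest' = a :: t' ∧ pvBlank a ≠ pvBlank l := by
      cases h : rest' with
      | nil => exact Or.inl rfl
      | cons a t' => exact Or.inr ⟨a, t', rfl, hhead a (by simp [h])⟩
    have hrw : cptB_runs (l :: rest) = (pvBlank l, l :: t) :: cptB_runs rest' := by
      conv_lhs => rw [show l :: rest = l :: (t ++ rest') by rw [hsplit]]
      exact cptB_runs_cons l t rest' hall_t hz
    rw [hrw, List.flatMap_cons, ← ih]
    cases hb : pvBlank l with
    | false =>
      have hnb : ∀ x ∈ t, pvBlank x = false := fun x hx => by rw [hall_t x hx, hb]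
      simp only [cptStep, if_neg Bool.false_ne_true]
      rw [show l :: rest = l :: (t ++ rest') by rw [hsplit]]
      simp only [cptA_loop, hb, if_neg Bool.false_ne_true]
      rw [cptA_loop_nonblank t hnb rest']
      rfl
    | true =>
      have hba : ∀ x ∈ l :: t, pvBlank x = true := by
        intro x hx
        rcases List.mem_cons.mp hx with h | h
        · simpa [h] using hb
        · rw [hall_t x h, hb]
      have hx : ∀ a ∈ rest'.head?, pvBlank a = false := by
        intro a haa
        have := hhead a haa
        rw [hb] at this
        cases hpa : pvBlank a
        · rfl
        · exact absurd hpa this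
      have := cptA_loop_blank (l :: t) hba rest' hx 0
      rw [show l :: rest = (l :: t) ++ rest' by simp [hsplit], this]
      simp [cptStep]

-- ===== VERDICT (by name: the statement is the Claim_ definition above) =====
theorem clean_poem_text_spec : Claim_equal_clean_poem_text := by
  intro text _
  unfold Spec_clean_poem_text clean_poem_text clean_poem_text_alt
  rw [cptB_runs_dropLead, cptB_runs_dropTrail, cptA_loop_eq_flatMap]
  have h := PySem.List.foldl_append_eq_flatMap
      (fun pr : Bool × List String => if pr.1 then pr.2.take 2 else pr.2)
      (cptB_runs (cptA_dropTrail (cptA_dropLead ((PySem.Str.split? text "\n").getD [])))) []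
  simp only [List.nil_append] at h
  rw [h, cptStep_flatMap_eq]
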